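-- pv_equiv track=rewrite | github.com/daniel-reich/ubiquitous-fiesta | kAQT4vMX2iEAcs8uJ_23.py | longest_7segment_word
-- ===== SOURCE A (Python) =====
-- def longest_7segment_word(lst):
--
--   Eligible = []
--   Spans = []
--
--   Counter = 0
--   Length = len(lst)
--
--   while (Counter < Length):
--
--     Thing = lst[Counter]
--     Item = Thing.upper()
--     Span = len(Item)
--
--     if ("K" in Item):
--       Counter += 1
--     elif ("M" in Item):
--       Counter += 1
--     elif ("V" in Item):
--       Counter += 1
--     elif ("W" in Item):
--       Counter += 1
--     elif ("X" in Item):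
--       Counter += 1
--     else:
--       Eligible.append(Thing)
--       Spans.append(Span)
--       Counter += 1
--
--   if (Eligible == []):
--     return ""
--
--   Longest = max(Spans)
--
--   Counter = 0
--   Length = len(Eligible)
--
--   while (Counter < Length):
--
--     Word = Eligible[Counter]
--     Distance = len(Word)
--
--     if (Distance == Longest):
--       return Word
--     else:
--       Counter += 1
-- ===== SOURCE B (Python) =====
-- def longest_7segment_word(lst):
--     best = ""
--     best_len = -1
--     for word in lst:
--         if any(c in word.upper() for c in "KMVWX"):
--             continue
--         if len(word) > best_len:
--             best = word
--             best_len = len(word)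
--     return best
-- ===== Notes on version B (the rewrite author's own statement) =====
-- stated objective: simpler
-- what changed: Replaced A's collect-eligible-then-rescan-for-the-max (two lists plus a second scan) by a single pass that tracks the running best eligible word with a strict length comparison.
import Mathlib
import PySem

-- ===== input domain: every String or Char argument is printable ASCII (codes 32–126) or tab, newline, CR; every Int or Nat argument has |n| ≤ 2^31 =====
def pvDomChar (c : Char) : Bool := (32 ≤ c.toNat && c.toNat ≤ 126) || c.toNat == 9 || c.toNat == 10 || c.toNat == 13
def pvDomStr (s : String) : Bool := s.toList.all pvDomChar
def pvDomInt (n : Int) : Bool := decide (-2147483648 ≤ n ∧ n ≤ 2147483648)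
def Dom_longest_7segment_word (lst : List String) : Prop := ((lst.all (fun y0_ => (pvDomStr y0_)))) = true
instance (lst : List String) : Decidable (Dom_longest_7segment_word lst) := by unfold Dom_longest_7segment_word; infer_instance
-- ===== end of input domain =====

-- B replaces A's collect-eligible-then-rescan (two auxiliary lists + second scan) by one pass
-- tracking the running best eligible word (objective: simpler; same O(n) cost).

-- ===== PORT A =====
-- first while loop of A: walk lst, collect eligible words and their spans (span = len(word.upper()))
def collectA : List String → List String × List Int
  | [] => ([], [])
  | t :: rest =>
    let item := PySem.Str.upper t
    let span := PySem.Str.len item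
    if PySem.Str.isIn "K" item then collectA rest
    else if PySem.Str.isIn "M" item then collectA rest
    else if PySem.Str.isIn "V" item then collectA rest
    else if PySem.Str.isIn "W" item then collectA rest
    else if PySem.Str.isIn "X" item then collectA rest
    else
      let (e, s) := collectA rest
      (t :: e, span :: s)

-- second while loop of A: first word whose length equals Longest; none = the loop falls off the
-- end (Python would return None there — unreachable, since Longest is attained in the list)
def scanA : List String → Int → Option String
  | [], _ => none
  | w :: rest, longest =>
    if PySem.Str.len w == longest then some w else scanA rest longest

def longest_7segment_word (lst : List String) : String :=
  let p := collectA lst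
  if p.1 = [] then ""
  else
    match PySem.List.max? p.2 (fun y => y) with
    | some longest => (scanA p.1 longest).getD ""   -- both getD defaults are unreachable:
    | none => ""                                    -- p.1 ≠ [] forces p.2 ≠ [] and max is attained

-- ===== PORT B =====
def longest_7segment_word_alt (lst : List String) : String :=
  (lst.foldl
    (fun (acc : String × Int) word =>
      if "KMVWX".toList.any (fun c => PySem.Str.isIn (String.ofList [c]) (PySem.Str.upper word)) then acc
      else if acc.2 < PySem.Str.len word then (word, PySem.Str.len word) else acc)
    ("", -1)).1

-- ===== PRECONDITION & SPEC =====
def Spec_longest_7segment_word (lst : List String) (out : String) : Prop := out = longest_7segment_word_alt lst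
instance (lst : List String) (out : String) : Decidable (Spec_longest_7segment_word lst out) := by unfold Spec_longest_7segment_word; infer_instance

-- ===== CLAIM (what is proved, stated in full; the proofs are below) =====
def Claim_equal_longest_7segment_word : Prop := ∀ (lst : List String), Dom_longest_7segment_word lst → Spec_longest_7segment_word lst (longest_7segment_word lst)

-- ===== LEMMAS AND PROOFS =====

-- the common eligibility test, and the length key
def pvElig (w : String) : Bool :=
  !("KMVWX".toList.any (fun c => PySem.Str.isIn (String.ofList [c]) (PySem.Str.upper w)))

def pvLen (w : String) : Int := (w.toList.length : Int)

lemma length_upper (s : List Char) : (PySem.Chars.upper s).length = s.length := by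
  simp [PySem.Chars.upper]

lemma len_pv (w : String) : PySem.Str.len w = pvLen w := by
  simp [pvLen]

lemma collectA_eq (lst : List String) :
    collectA lst = (lst.filter pvElig, (lst.filter pvElig).map pvLen) := by
  induction lst with
  | nil => rfl
  | cons t rest ih =>
    by_cases hK : PySem.Str.isIn "K" (PySem.Str.upper t) = true <;>
      by_cases hM : PySem.Str.isIn "M" (PySem.Str.upper t) = true <;>
        by_cases hV : PySem.Str.isIn "V" (PySem.Str.upper t) = true <;>
          by_cases hW : PySem.Str.isIn "W" (PySem.Str.upper t) = true <;>
            by_cases hX : PySem.Str.isIn "X" (PySem.Str.upper t) = true <;>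
              simp_all [collectA, pvElig, pvLen, length_upper,
                show "KMVWX".toList = ['K','M','V','W','X'] from rfl]

-- B's fold skips ineligible words, so it is the plain best-tracking fold over the filtered list
lemma foldB_filter (lst : List String) (acc : String × Int) :
    lst.foldl
      (fun (acc : String × Int) word =>
        if "KMVWX".toList.any (fun c => PySem.Str.isIn (String.ofList [c]) (PySem.Str.upper word)) then acc
        else if acc.2 < PySem.Str.len word then (word, PySem.Str.len word) else acc)
      acc
    = (lst.filter pvElig).foldl
        (fun (acc : String × Int) word =>
          if acc.2 < pvLen word then (word, pvLen word) else acc) acc := by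
  induction lst generalizing acc with
  | nil => rfl
  | cons t rest ih =>
    rcases h : pvElig t with _ | _
    · have h' : ("KMVWX".toList.any
          (fun c => PySem.Str.isIn (String.ofList [c]) (PySem.Str.upper t))) = true := by
        have := h; unfold pvElig at this; rwa [Bool.not_eq_false'] at this
      rw [List.filter_cons, if_neg (by rw [h]; simp)]
      simp only [List.foldl_cons, h', if_true]
      exact ih acc
    · have h' : ("KMVWX".toList.any
          (fun c => PySem.Str.isIn (String.ofList [c]) (PySem.Str.upper t))) = false := by
        have := h; unfold pvElig at this; rwa [Bool.not_eq_true'] at this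
      rw [List.filter_cons, if_pos h]
      simp only [List.foldl_cons, h', Bool.false_eq_true, if_false, len_pv]
      exact ih _

-- core: the best-tracking fold seeded with (b, len b) finds the first word of b :: es whose
-- length equals the running maximum of the lengths of b :: es
lemma fold_eq_scan (es : List String) (b : String) :
    (es.foldl (fun (acc : String × Int) word =>
        if acc.2 < pvLen word then (word, pvLen word) else acc) (b, pvLen b)).1
    = (scanA (b :: es) ((es.map pvLen).foldl max (pvLen b))).getD "" := by
  induction es generalizing b with
  | nil => simp [scanA, pvLen, String.length_toList]
  | cons e es ih =>
    rw [List.map_cons, List.foldl_cons, List.foldl_cons]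
    by_cases h : pvLen b < pvLen e
    · have hmax : max (pvLen b) (pvLen e) = pvLen e := max_eq_right h.le
      have hble : pvLen e <= (es.map pvLen).foldl max (pvLen e) :=
        (PySem.List.le_foldl_max (es.map pvLen) (pvLen e)).1
      have hb : ¬ (pvLen b = (es.map pvLen).foldl max (pvLen e)) := by omega
      rw [if_pos h, hmax, ih e]
      simp only [scanA, len_pv, beq_iff_eq]
      rw [if_neg hb]
    · have hmax : max (pvLen b) (pvLen e) = pvLen b := max_eq_left (by omega)
      have hble : pvLen b <= (es.map pvLen).foldl max (pvLen b) :=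
        (PySem.List.le_foldl_max (es.map pvLen) (pvLen b)).1
      rw [if_neg h, hmax, ih b]
      simp only [scanA, len_pv, beq_iff_eq]
      by_cases hb : pvLen b = (es.map pvLen).foldl max (pvLen b)
      · rw [if_pos hb, if_pos hb]
      · have hene : ¬ (pvLen e = (es.map pvLen).foldl max (pvLen b)) := by omega
        rw [if_neg hb, if_neg hb, if_neg hene]

-- ===== VERDICT (by name: the statement is the Claim_ definition above) =====
theorem longest_7segment_word_spec : Claim_equal_longest_7segment_word := by
  intro lst _
  unfold Spec_longest_7segment_word longest_7segment_word longest_7segment_word_alt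
  rw [collectA_eq, foldB_filter]
  cases hE : lst.filter pvElig with
  | nil => simp
  | cons b es =>
    simp only [List.map_cons, PySem.List.max?_id_cons, reduceCtorEq, if_neg, not_false_iff]
    exact (fold_eq_scan es b).symm
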